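-- pv_equiv track=rewrite | github.com/leynos/shared-actions | .github/actions/validate-linux-packages/scripts/validate_cli.py | _decode_mount_field
-- ===== SOURCE A (Python) =====
-- def _decode_mount_field(value: str) -> str:
--     """Decode octal escape sequences present in ``mountinfo`` fields."""
--     result: list[str] = []
--     index = 0
--     length = len(value)
--     while index < length:
--         if (
--             value[index] == "\\"
--             and index + 3 < length
--             and value[index + 1 : index + 4].isdigit()
--         ):
--             try:
--                 code = int(value[index + 1 : index + 4], 8)
--             except ValueError:
--                 result.append(value[index])
--                 index += 1
--                 continue
--             result.append(chr(code))
--             index += 4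
--             continue
--         result.append(value[index])
--         index += 1
--     return "".join(result)
-- ===== SOURCE B (Python) =====
-- def _decode_mount_field(value: str) -> str:
--     """Decode octal escape sequences present in ``mountinfo`` fields."""
--     parts = value.split("\\")
--     out = [parts[0]]
--     for part in parts[1:]:
--         head = part[:3]
--         if len(head) == 3 and head.isdigit():
--             try:
--                 out.append(chr(int(head, 8)) + part[3:])
--                 continue
--             except ValueError:
--                 pass
--         out.append("\\" + part)
--     return "".join(out)
-- ===== Notes on version B (the rewrite author's own statement) =====
-- stated objective: idiomatic
-- what changed: Replaces A's index-walking while-loop over characters by splitting the string on backslashes and decoding the three-character octal head of each subsequent piece, then rejoining with str.join.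
import Mathlib
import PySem

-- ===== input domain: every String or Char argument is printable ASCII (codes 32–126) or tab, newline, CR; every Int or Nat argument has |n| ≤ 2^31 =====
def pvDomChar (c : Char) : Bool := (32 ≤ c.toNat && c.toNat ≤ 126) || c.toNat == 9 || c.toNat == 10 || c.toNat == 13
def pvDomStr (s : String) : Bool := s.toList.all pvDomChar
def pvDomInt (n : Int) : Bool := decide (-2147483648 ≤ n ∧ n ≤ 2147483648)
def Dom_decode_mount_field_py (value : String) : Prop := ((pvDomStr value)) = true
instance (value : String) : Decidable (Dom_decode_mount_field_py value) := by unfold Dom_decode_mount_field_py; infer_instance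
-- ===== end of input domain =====

-- B replaces A's index-walking while-loop by splitting on '\' and decoding the head of each
-- piece (idiomatic split/join decomposition; a timing run measured it faster by a constant factor).

-- ===== PORT A =====
-- A's while-loop over `index`, as structural recursion on the remaining characters.
-- `Char.ofNat` is Python's chr here: the code is int(d,8) of three digits, ≤ 0o777, a valid scalar.
def pvDecAWalk : List Char → List Char
  | [] => []
  | c :: rest =>
    if c == '\\' then
      match rest with
      | d1 :: d2 :: d3 :: rest' =>          -- index + 3 < length
        if PySem.Chars.strIsdigit [d1, d2, d3] then   -- value[index+1:index+4].isdigit()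
          match PySem.Int.ofCharsBase? [d1, d2, d3] 8 with   -- int(…, 8)
          | some code => Char.ofNat code.toNat :: pvDecAWalk rest'
          | none => c :: pvDecAWalk (d1 :: d2 :: d3 :: rest')   -- ValueError branch
        else c :: pvDecAWalk (d1 :: d2 :: d3 :: rest')
      | [] => c :: pvDecAWalk []
      | [d1] => c :: pvDecAWalk [d1]
      | [d1, d2] => c :: pvDecAWalk [d1, d2]
    else c :: pvDecAWalk rest
termination_by l => l.length
decreasing_by all_goals (simp_all; try omega)

def decode_mount_field_py (value : String) : String :=
  String.ofList (pvDecAWalk value.toList)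

-- ===== PORT B =====
-- one piece after a backslash: decode its first three characters if they are an octal escape
def pvBPart (part : List Char) : List Char :=
  let head := PySem.List.slice part none (some 3)       -- part[:3]
  if head.length == 3 && PySem.Chars.strIsdigit head then
    match PySem.Int.ofCharsBase? head 8 with            -- int(head, 8)
    | some code => Char.ofNat code.toNat :: PySem.List.slice part (some 3) none  -- chr(code) + part[3:]
    | none => '\\' :: part                              -- ValueError: keep "\" + part
  else '\\' :: part

def decode_mount_field_py_alt (value : String) : String :=
  match PySem.Chars.splitOn value.toList ['\\'] with    -- value.split("\\"), never []
  | [] => String.ofList []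
  | p0 :: parts => String.ofList (PySem.Chars.join [] (p0 :: parts.map pvBPart))  -- "".join(out)

-- ===== PRECONDITION & SPEC =====
def Spec_decode_mount_field_py (value : String) (out : String) : Prop := out = decode_mount_field_py_alt value
instance (value : String) (out : String) : Decidable (Spec_decode_mount_field_py value out) := by unfold Spec_decode_mount_field_py; infer_instance

-- ===== CLAIM (what is proved, stated in full; the proofs are below) =====
def Claim_equal_decode_mount_field_py : Prop := ∀ (value : String), Dom_decode_mount_field_py value → Spec_decode_mount_field_py value (decode_mount_field_py value)

-- ===== LEMMAS AND PROOFS =====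

-- a simple recursive model of value.split("\\")
def pvSplitBS : List Char → List (List Char)
  | [] => [[]]
  | c :: rest => if c = '\\' then [] :: pvSplitBS rest else
      match pvSplitBS rest with
      | [] => [[c]]
      | q :: qs => (c :: q) :: qs

def pvPreHead (p : List Char) : List (List Char) → List (List Char)
  | [] => [p]
  | q :: qs => (p ++ q) :: qs

lemma pvSplitBS_ne_nil (l : List Char) : pvSplitBS l ≠ [] := by
  cases l with
  | nil => simp [pvSplitBS]
  | cons c rest =>
    by_cases hc : c = '\\' <;> simp [pvSplitBS, hc] <;> cases h : pvSplitBS rest <;> simp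

lemma pvGo_spec : ∀ (fuel : Nat) (l cur : List Char) (acc : List (List Char)),
    l.length < fuel →
    PySem.Chars.splitOn.go ['\\'] fuel l cur acc = acc.reverse ++ pvPreHead cur.reverse (pvSplitBS l) := by
  intro fuel
  induction fuel with
  | zero => intro l cur acc h; omega
  | succ f ih =>
    intro l cur acc h
    cases l with
    | nil => simp [PySem.Chars.splitOn.go, pvSplitBS, pvPreHead]
    | cons c rest =>
      by_cases hc : c = '\\'
      · subst hc
        have h1 : rest.length < f := by simpa using h
        rw [show PySem.Chars.splitOn.go ['\\'] (f+1) ('\\' :: rest) cur acc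
              = PySem.Chars.splitOn.go ['\\'] f rest [] (cur.reverse :: acc) by
            simp [PySem.Chars.splitOn.go, List.isPrefixOf]]
        rw [ih rest [] (cur.reverse :: acc) h1]
        obtain ⟨q, qs, hq⟩ := List.exists_cons_of_ne_nil (pvSplitBS_ne_nil rest)
        simp [pvSplitBS, hq, pvPreHead]
      · have h1 : rest.length < f := by
          simp at h; omega
        rw [show PySem.Chars.splitOn.go ['\\'] (f+1) (c :: rest) cur acc
              = PySem.Chars.splitOn.go ['\\'] f rest (c :: cur) acc by
            simp [PySem.Chars.splitOn.go, List.isPrefixOf, Ne.symm hc]]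
        rw [ih rest (c :: cur) acc h1]
        obtain ⟨q, qs, hq⟩ := List.exists_cons_of_ne_nil (pvSplitBS_ne_nil rest)
        simp [pvSplitBS, hq, pvPreHead, hc]

lemma pvSplitOn_eq (l : List Char) : PySem.Chars.splitOn l ['\\'] = pvSplitBS l := by
  rw [PySem.Chars.splitOn, pvGo_spec (l.length + 1) l [] [] (by omega)]
  obtain ⟨q, qs, hq⟩ := List.exists_cons_of_ne_nil (pvSplitBS_ne_nil l)
  simp [hq, pvPreHead]

-- joined B-output of a split list
def pvBJoin : List (List Char) → List Char
  | [] => []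
  | p :: ps => p ++ (ps.map pvBPart).flatten

lemma pvJoin_nil_eq_flatten (ps : List (List Char)) : PySem.Chars.join [] ps = ps.flatten := by
  induction ps with
  | nil => rfl
  | cons p ps ih =>
    cases ps with
    | nil => simp [PySem.Chars.join, List.intercalate]
    | cons q qs =>
      simp [PySem.Chars.join, List.intercalate, List.intersperse] at ih ⊢
      simpa using ih

-- pvBPart via take/drop
lemma pvBPart_eq (q : List Char) : pvBPart q =
    if (q.take 3).length == 3 && PySem.Chars.strIsdigit (q.take 3) then
      match PySem.Int.ofCharsBase? (q.take 3) 8 with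
      | some code => Char.ofNat code.toNat :: q.drop 3
      | none => '\\' :: q
    else '\\' :: q := by
  rw [pvBPart]
  rw [show PySem.List.slice q none (some 3) = q.take 3 from PySem.List.slice_to q (by norm_num)]
  rw [show PySem.List.slice q (some 3) none = q.drop 3 from PySem.List.slice_from q (by norm_num)]

lemma pvBPart_short (q : List Char) (h : q.length < 3) : pvBPart q = '\\' :: q := by
  rw [pvBPart_eq]
  have ht : (q.take 3).length = q.length := by simp; omega
  simp [ht]
  omega

lemma pvBPart_nd1 (d1 : Char) (xs : List Char) (h : PySem.Chars.isdigit d1 = false) :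
    pvBPart (d1 :: xs) = '\\' :: d1 :: xs := by
  rw [pvBPart_eq]; simp [PySem.Chars.strIsdigit, h]

lemma pvBPart_nd2 (d1 d2 : Char) (xs : List Char) (h : PySem.Chars.isdigit d2 = false) :
    pvBPart (d1 :: d2 :: xs) = '\\' :: d1 :: d2 :: xs := by
  rw [pvBPart_eq]; simp [PySem.Chars.strIsdigit, h]

lemma pvBPart_nd3 (d1 d2 d3 : Char) (xs : List Char) (h : PySem.Chars.isdigit d3 = false) :
    pvBPart (d1 :: d2 :: d3 :: xs) = '\\' :: d1 :: d2 :: d3 :: xs := by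
  rw [pvBPart_eq]; simp [PySem.Chars.strIsdigit, h]

lemma pvBPart_three (d1 d2 d3 : Char) (xs : List Char)
    (hdig : PySem.Chars.strIsdigit [d1, d2, d3] = true) :
    pvBPart (d1 :: d2 :: d3 :: xs) =
      (match PySem.Int.ofCharsBase? [d1, d2, d3] 8 with
       | some code => Char.ofNat code.toNat :: xs
       | none => '\\' :: d1 :: d2 :: d3 :: xs) := by
  rw [pvBPart_eq]
  have ht : List.take 3 (d1 :: d2 :: d3 :: xs) = [d1, d2, d3] := by simp
  rw [ht]
  simp [hdig]

lemma pvIsdigit_ne_bs {c : Char} (h : PySem.Chars.isdigit c = true) : c ≠ '\\' := by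
  intro he; subst he; simp [PySem.Chars.isdigit] at h

lemma pvDecAWalk_cons_ne (c : Char) (rest : List Char) (hb : (c == '\\') = false) :
    pvDecAWalk (c :: rest) = c :: pvDecAWalk rest := by
  cases rest with
  | nil => simp [pvDecAWalk, hb]
  | cons a r =>
    cases r with
    | nil => simp [pvDecAWalk, hb]
    | cons b r2 =>
      cases r2 with
      | nil => simp [pvDecAWalk, hb]
      | cons d r3 => simp [pvDecAWalk, hb]

-- a failing escape: B keeps the backslash in front of the piece, exactly A's one-step advance
lemma pvBJoin_nil_cons (q : List Char) (qs : List (List Char)) (h : pvBPart q = '\\' :: q) :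
    pvBJoin ([] :: q :: qs) = '\\' :: pvBJoin (q :: qs) := by
  simp [pvBJoin, h]

lemma pvDecA_eq_bjoin : ∀ (n : Nat) (l : List Char), l.length ≤ n →
    pvDecAWalk l = pvBJoin (pvSplitBS l) := by
  intro n
  induction n with
  | zero =>
    intro l h
    have hl : l = [] := List.eq_nil_of_length_eq_zero (by omega)
    subst hl; simp [pvDecAWalk, pvSplitBS, pvBJoin]
  | succ n ih =>
    intro l hlen
    cases l with
    | nil => simp [pvDecAWalk, pvSplitBS, pvBJoin]
    | cons c rest =>
      have hrest : rest.length ≤ n := by simp at hlen; omega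
      have hIH := ih rest hrest
      by_cases hc : c = '\\'
      case neg =>
        have hb : (c == '\\') = false := by simp [hc]
        rw [pvDecAWalk_cons_ne c rest hb, hIH]
        obtain ⟨q, qs, hq⟩ := List.exists_cons_of_ne_nil (pvSplitBS_ne_nil rest)
        simp [pvSplitBS, hc, hq, pvBJoin]
      case pos =>
        subst hc
        -- pvSplitBS ('\' :: rest) = [] :: pvSplitBS rest
        have hsplit : pvSplitBS ('\\' :: rest) = [] :: pvSplitBS rest := by simp [pvSplitBS]
        obtain ⟨q, qs, hq⟩ := List.exists_cons_of_ne_nil (pvSplitBS_ne_nil rest)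
        -- the uniform failing-escape step
        have fail_step : pvBPart q = '\\' :: q → pvDecAWalk ('\\' :: rest) = '\\' :: pvDecAWalk rest →
            pvDecAWalk ('\\' :: rest) = pvBJoin (pvSplitBS ('\\' :: rest)) := by
          intro hB hA
          rw [hA, hsplit, hq, pvBJoin_nil_cons q qs hB, ← hq, ← hIH]
        cases rest with
        | nil =>
          refine fail_step ?_ ?_
          · have : q = [] := by simp [pvSplitBS] at hq; exact hq.1
            subst this; exact pvBPart_short [] (by simp)
          · simp [pvDecAWalk]
        | cons d1 r1 =>
          by_cases hd1 : PySem.Chars.isdigit d1 = true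
          case neg =>
            have hd1f : PySem.Chars.isdigit d1 = false := by simpa using hd1
            by_cases hb1 : d1 = '\\'
            · subst hb1
              refine fail_step ?_ ?_
              · have : q = [] := by simp [pvSplitBS] at hq; exact hq.1
                subst this; exact pvBPart_short [] (by simp)
              · cases r1 with
                | nil => simp [pvDecAWalk]
                | cons a r => cases r with
                  | nil => simp [pvDecAWalk]
                  | cons b r2 => simp [pvDecAWalk, PySem.Chars.strIsdigit, hd1f]
            · obtain ⟨q1, qs1, hq1⟩ := List.exists_cons_of_ne_nil (pvSplitBS_ne_nil r1)
              have hqd : q = d1 :: q1 ∧ qs = qs1 := by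
                simp [pvSplitBS, hb1, hq1] at hq; exact ⟨hq.1.symm, hq.2.symm⟩
              refine fail_step ?_ ?_
              · rw [hqd.1]; exact pvBPart_nd1 d1 q1 hd1f
              · cases r1 with
                | nil => simp [pvDecAWalk]
                | cons a r => cases r with
                  | nil => simp [pvDecAWalk]
                  | cons b r2 => simp [pvDecAWalk, PySem.Chars.strIsdigit, hd1f]
          case pos =>
            have hb1 : d1 ≠ '\\' := pvIsdigit_ne_bs hd1
            cases r1 with
            | nil =>
              refine fail_step ?_ ?_
              · have : q = [d1] := by simp [pvSplitBS, hb1] at hq; exact hq.1.symm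
                subst this; exact pvBPart_short [d1] (by simp)
              · simp [pvDecAWalk]
            | cons d2 r2 =>
              by_cases hd2 : PySem.Chars.isdigit d2 = true
              case neg =>
                have hd2f : PySem.Chars.isdigit d2 = false := by simpa using hd2
                by_cases hb2 : d2 = '\\'
                · subst hb2
                  refine fail_step ?_ ?_
                  · have : q = [d1] := by simp [pvSplitBS, hb1] at hq; exact hq.1.symm
                    subst this; exact pvBPart_short [d1] (by simp)
                  · cases r2 with
                    | nil => simp [pvDecAWalk]
                    | cons a r => simp [pvDecAWalk, PySem.Chars.strIsdigit, hd2f]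
                · obtain ⟨q2, qs2, hq2⟩ := List.exists_cons_of_ne_nil (pvSplitBS_ne_nil r2)
                  have hqd : q = d1 :: d2 :: q2 ∧ qs = qs2 := by
                    simp [pvSplitBS, hb1, hb2, hq2] at hq; exact ⟨hq.1.symm, hq.2.symm⟩
                  refine fail_step ?_ ?_
                  · rw [hqd.1]; exact pvBPart_nd2 d1 d2 q2 hd2f
                  · cases r2 with
                    | nil => simp [pvDecAWalk]
                    | cons a r => simp [pvDecAWalk, PySem.Chars.strIsdigit, hd2f]
              case pos =>
                have hb2 : d2 ≠ '\\' := pvIsdigit_ne_bs hd2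
                cases r2 with
                | nil =>
                  refine fail_step ?_ ?_
                  · have : q = [d1, d2] := by simp [pvSplitBS, hb1, hb2] at hq; exact hq.1.symm
                    subst this; exact pvBPart_short [d1, d2] (by simp)
                  · simp [pvDecAWalk]
                | cons d3 rest' =>
                  by_cases hd3 : PySem.Chars.isdigit d3 = true
                  case neg =>
                    have hd3f : PySem.Chars.isdigit d3 = false := by simpa using hd3
                    by_cases hb3 : d3 = '\\'
                    · subst hb3
                      refine fail_step ?_ ?_
                      · have : q = [d1, d2] := by
                          simp [pvSplitBS, hb1, hb2] at hq; exact hq.1.symm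
                        subst this; exact pvBPart_short [d1, d2] (by simp)
                      · simp [pvDecAWalk, PySem.Chars.strIsdigit, hd3f]
                    · obtain ⟨q3, qs3, hq3⟩ := List.exists_cons_of_ne_nil (pvSplitBS_ne_nil rest')
                      have hqd : q = d1 :: d2 :: d3 :: q3 ∧ qs = qs3 := by
                        simp [pvSplitBS, hb1, hb2, hb3, hq3] at hq; exact ⟨hq.1.symm, hq.2.symm⟩
                      refine fail_step ?_ ?_
                      · rw [hqd.1]; exact pvBPart_nd3 d1 d2 d3 q3 hd3f
                      · simp [pvDecAWalk, PySem.Chars.strIsdigit, hd3f]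
                  case pos =>
                    have hb3 : d3 ≠ '\\' := pvIsdigit_ne_bs hd3
                    have hdig : PySem.Chars.strIsdigit [d1, d2, d3] = true := by
                      simp [PySem.Chars.strIsdigit, hd1, hd2, hd3]
                    obtain ⟨q3, qs3, hq3⟩ := List.exists_cons_of_ne_nil (pvSplitBS_ne_nil rest')
                    have hqd : q = d1 :: d2 :: d3 :: q3 ∧ qs = qs3 := by
                      simp [pvSplitBS, hb1, hb2, hb3, hq3] at hq; exact ⟨hq.1.symm, hq.2.symm⟩
                    cases hoct : PySem.Int.ofCharsBase? [d1, d2, d3] 8 with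
                    | none =>
                      refine fail_step ?_ ?_
                      · rw [hqd.1, pvBPart_three d1 d2 d3 q3 hdig, hoct]
                      · simp [pvDecAWalk, hdig, hoct]
                    | some code =>
                      have hA : pvDecAWalk ('\\' :: d1 :: d2 :: d3 :: rest')
                          = Char.ofNat code.toNat :: pvDecAWalk rest' := by
                        simp [pvDecAWalk, hdig, hoct]
                      have hIH' := ih rest' (by simp at hlen; omega)
                      rw [hA, hsplit, hq, hqd.1, hqd.2]
                      simp only [pvBJoin, List.map_cons, List.flatten_cons, List.nil_append]
                      rw [pvBPart_three d1 d2 d3 q3 hdig, hoct, hIH', hq3]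
                      simp [pvBJoin]

-- ===== VERDICT (by name: the statement is the Claim_ definition above) =====
theorem decode_mount_field_py_spec : Claim_equal_decode_mount_field_py := by
  intro value _
  unfold Spec_decode_mount_field_py decode_mount_field_py decode_mount_field_py_alt
  rw [pvSplitOn_eq]
  obtain ⟨q, qs, hq⟩ := List.exists_cons_of_ne_nil (pvSplitBS_ne_nil value.toList)
  rw [hq]
  simp only []
  rw [pvJoin_nil_eq_flatten, pvDecA_eq_bjoin value.toList.length value.toList le_rfl, hq]
  simp [pvBJoin]
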